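-- pv_equiv track=rewrite | github.com/mehanikm/reminder_bot | funcs.py | year_f
-- ===== SOURCE A (Python) =====
-- def year_f(y: int) -> dict:
--     """Generates dict with
--     keys-months and values-lists of its days
--     """
--     year = {i: [j for j in range(1, 31)] for i in range(1, 13)}
--     for i in [1, 3, 5, 7, 8, 10, 12]:
--         year[i].append(31)
--     if y % 4 == 0:
--         year[2].pop()
--     elif y % 4 != 0:
--         year[2].pop()
--         year[2].pop()
--     return year
-- ===== SOURCE B (Python) =====
-- def year_f(y: int) -> dict:
--     """Generates dict with
--     keys-months and values-lists of its days
--     """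
--     feb = 29 if y % 4 == 0 else 28
--     days = {1: 31, 2: feb, 3: 31, 4: 30, 5: 31, 6: 30,
--             7: 31, 8: 31, 9: 30, 10: 31, 11: 30, 12: 31}
--     return {m: list(range(1, d + 1)) for m, d in days.items()}
-- ===== Notes on version B (the rewrite author's own statement) =====
-- stated objective: simpler
-- what changed: B computes a per-month day-count table (with February 29/28 by the same y%4 test) and fills each month's day list directly in one comprehension, instead of A's build-30-days-for-every-month then append-31/pop-correction passes.
import Mathlib
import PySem

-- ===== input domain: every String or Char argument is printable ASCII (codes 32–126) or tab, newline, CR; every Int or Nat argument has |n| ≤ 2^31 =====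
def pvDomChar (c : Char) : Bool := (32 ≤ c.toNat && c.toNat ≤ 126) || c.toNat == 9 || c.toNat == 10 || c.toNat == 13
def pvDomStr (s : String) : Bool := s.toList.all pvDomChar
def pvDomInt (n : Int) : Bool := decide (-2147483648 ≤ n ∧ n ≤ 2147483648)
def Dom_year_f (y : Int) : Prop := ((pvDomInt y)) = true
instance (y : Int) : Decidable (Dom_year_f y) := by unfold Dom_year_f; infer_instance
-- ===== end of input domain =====

-- B replaces A's build-30-days-then-append/pop correction steps with a day-count table
-- filled in one comprehension (February by the same y%4 test); return-value equivalence only.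

-- ===== PORT A =====
-- {i: [j for j in range(1, 31)] for i in range(1, 13)}
-- then append 31 to the long months, then pop from February once (leap) or twice.
-- year[i].append(31) / year[2].pop() mutate the list stored under a key: ported
-- exactly as Dict.modify with l ++ [31] resp. l.dropLast (pop() on these nonempty
-- lists removes and discards the last element).
def year_f (y : Int) : List (Int × List Int) :=
  let year : PySem.Dict Int (List Int) :=
    (PySem.List.pyRange 1 13 1).foldl
      (fun d i => d.insert i (PySem.List.pyRange 1 31 1)) PySem.Dict.empty
  let year := ([1, 3, 5, 7, 8, 10, 12] : List Int).foldl
      (fun d i => d.modify i [] (fun l => l ++ [31])) year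
  let year :=
    if PySem.Int.mod y 4 = 0 then
      year.modify 2 [] (fun l => l.dropLast)
    else if PySem.Int.mod y 4 ≠ 0 then
      (year.modify 2 [] (fun l => l.dropLast)).modify 2 [] (fun l => l.dropLast)
    else year
  year.items

-- ===== PORT B =====
def year_f_alt (y : Int) : List (Int × List Int) :=
  let feb : Int := if PySem.Int.mod y 4 = 0 then 29 else 28
  let days : List (Int × Int) :=
    [(1, 31), (2, feb), (3, 31), (4, 30), (5, 31), (6, 30),
     (7, 31), (8, 31), (9, 30), (10, 31), (11, 30), (12, 31)]
  days.map (fun p => (p.1, PySem.List.pyRange 1 (p.2 + 1) 1))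

-- ===== PRECONDITION & SPEC =====
def Spec_year_f (y : Int) (out : List (Int × List Int)) : Prop := out = year_f_alt y
instance (y : Int) (out : List (Int × List Int)) : Decidable (Spec_year_f y out) := by unfold Spec_year_f; infer_instance

-- ===== CLAIM (what is proved, stated in full; the proofs are below) =====
def Claim_equal_year_f : Prop := ∀ (y : Int), Dom_year_f y → Spec_year_f y (year_f y)

-- ===== LEMMAS AND PROOFS =====

-- ===== VERDICT (by name: the statement is the Claim_ definition above) =====
theorem year_f_spec : Claim_equal_year_f := by
  intro y _
  unfold Spec_year_f year_f year_f_alt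
  by_cases h : (4 : Int) ∣ y <;>
    simp [h] <;> decide
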